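-- pv_equiv track=rewrite | github.com/AdamZhouSE/pythonHomework | Code/CodeRecords/2876/61020/297098.py | min_switch
-- ===== SOURCE A (Python) =====
-- import itertools
-- import copy
--
-- def indexes_of(a_list_, ele):
--     result = []
--     for j in range(len(a_list_)):
--         if a_list_[j] == ele:
--             result.append(j)
--
--     return result
--
-- def is_done(a_list):
--     if len(a_list) <= 2:
--         return True
--
--     if len(a_list) == 3:
--         if a_list != ['1', '0', '1']:
--             return True
--
--         return False
--
--     if len(a_list) > 3:
--         return is_done(a_list[0:3]) and is_done(a_list[1:])
--
-- def min_switch(a_list):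
--     indexes_of_1 = indexes_of(a_list, '1')
--     if is_done(a_list):
--         return 0
--
--     for i in range(1, len(indexes_of_1)):
--         coms = list(itertools.combinations(indexes_of_1, 1))
--         for indexes in coms:
--             seq_to_be_change = copy.copy(a_list)
--             for index in indexes:
--                 seq_to_be_change[index] = 0
--                 if is_done(seq_to_be_change):
--                     return i
-- ===== SOURCE B (Python) =====
-- def is_done(a_list):
--     return all(a_list[i:i+3] != ['1', '0', '1'] for i in range(len(a_list) - 2))
--
-- def min_switch(a_list):
--     if is_done(a_list):
--         return 0
--     ones = [j for j in range(len(a_list)) if a_list[j] == '1']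
--     if len(ones) < 2:
--         return None
--     for p in ones:
--         candidate = list(a_list)
--         candidate[p] = 0
--         if is_done(candidate):
--             return 1
--     return None
-- ===== Notes on version B (the rewrite author's own statement) =====
-- stated objective: simpler
-- what changed: is_done becomes a single iterative sliding-window scan instead of recursion over overlapping slices, and min_switch replaces the redundant outer counter loop over itertools.combinations(...,1) with one direct pass over the '1' positions.
import Mathlib
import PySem

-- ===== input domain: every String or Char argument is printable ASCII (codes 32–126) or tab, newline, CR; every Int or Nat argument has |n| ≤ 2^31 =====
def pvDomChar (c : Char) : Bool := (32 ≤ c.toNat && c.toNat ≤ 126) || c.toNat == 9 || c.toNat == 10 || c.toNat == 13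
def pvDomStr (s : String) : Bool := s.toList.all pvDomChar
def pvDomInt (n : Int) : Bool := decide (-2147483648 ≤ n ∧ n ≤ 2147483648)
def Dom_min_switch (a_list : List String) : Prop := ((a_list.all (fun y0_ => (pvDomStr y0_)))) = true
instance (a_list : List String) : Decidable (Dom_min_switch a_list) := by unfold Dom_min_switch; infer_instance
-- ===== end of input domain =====

-- B rewrites the recursive slice-based is_done as one iterative sliding-window scan and drops
-- the redundant outer combinations loop; return value only (A mutates only its local copy).
-- The Python code writes the INTEGER 0 into a list of strings; we model elements as Option String,
-- `none` standing for that integer 0 (which Python compares unequal to every string) — exact here.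

-- ===== PORT A =====
-- is_done: recursion over the slices a_list[0:3] and a_list[1:]
def isDoneA (l : List (Option String)) : Bool :=
  if l.length ≤ 2 then true
  else if l.length = 3 then decide (l ≠ [some "1", some "0", some "1"])
  else isDoneA (l.take 3) && isDoneA (l.drop 1)
termination_by l.length
decreasing_by
  · simp only [List.length_take]; omega
  · simp only [List.length_drop]; omega

-- indexes_of: for j in range(len): if a_list_[j] == ele: result.append(j)
def indexes_of (l : List String) (ele : String) : List Nat :=
  (List.range l.length).foldl (fun res j => if l.getD j "" == ele then res ++ [j] else res) []

-- inner: for indexes in coms (each a 1-tuple (j,)): copy, seq[j] = 0, if is_done: return i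
def innerA (a_list : List String) (i : Int) : List Nat → Option Int
  | [] => none
  | j :: rest =>
    if isDoneA ((a_list.map some).set j none) then some i else innerA a_list i rest

-- outer: for i in range(1, len(indexes_of_1))
def loopA (a_list : List String) (idx1 : List Nat) : List Int → Option Int
  | [] => none
  | i :: rest =>
    match innerA a_list i idx1 with
    | some r => some r
    | none => loopA a_list idx1 rest

def min_switch (a_list : List String) : Option Int :=
  let idx1 := indexes_of a_list "1"
  if isDoneA (a_list.map some) then some 0
  else loopA a_list idx1 (PySem.List.pyRange 1 (idx1.length : Int) 1)

-- ===== PORT B =====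
-- is_done: all(a_list[i:i+3] != ['1','0','1'] for i in range(len(a_list)-2))
def isDoneB (l : List (Option String)) : Bool :=
  (List.range (l.length - 2)).all
    (fun i => decide ((l.drop i).take 3 ≠ [some "1", some "0", some "1"]))

def min_switch_alt (a_list : List String) : Option Int :=
  if isDoneB (a_list.map some) then some 0
  else
    let ones := (List.range a_list.length).filterMap
      (fun j => if a_list.getD j "" == "1" then some j else none)
    if ones.length < 2 then none
    else if ones.any (fun p => isDoneB ((a_list.map some).set p none)) then some 1 else none

-- ===== PRECONDITION & SPEC =====
def Spec_min_switch (a_list : List String) (out : Option Int) : Prop := out = min_switch_alt a_list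
instance (a_list : List String) (out : Option Int) : Decidable (Spec_min_switch a_list out) := by unfold Spec_min_switch; infer_instance

-- ===== CLAIM (what is proved, stated in full; the proofs are below) =====
def Claim_equal_min_switch : Prop := ∀ (a_list : List String), Dom_min_switch a_list → Spec_min_switch a_list (min_switch a_list)

-- ===== LEMMAS AND PROOFS =====

lemma isDoneB_short (l : List (Option String)) (h : l.length ≤ 2) : isDoneB l = true := by
  unfold isDoneB
  have : l.length - 2 = 0 := by omega
  simp [this]

lemma isDoneB_cons (a : Option String) (l : List (Option String)) (h : 2 ≤ l.length) :
    isDoneB (a :: l) =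
      (decide (((a :: l).take 3) ≠ [some "1", some "0", some "1"]) && isDoneB l) := by
  unfold isDoneB
  have hlen : (a :: l).length - 2 = (l.length - 2) + 1 := by
    simp only [List.length_cons]; omega
  rw [hlen, List.range_succ_eq_map]
  simp only [List.all_cons, List.all_map]
  congr 1

lemma isDoneA_short (l : List (Option String)) (h : l.length ≤ 2) : isDoneA l = true := by
  unfold isDoneA; simp [h]

lemma isDoneA_three (l : List (Option String)) (h : l.length = 3) :
    isDoneA l = decide (l ≠ [some "1", some "0", some "1"]) := by
  unfold isDoneA
  simp [h]

lemma isDoneA_long (l : List (Option String)) (h : 4 ≤ l.length) :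
    isDoneA l = (isDoneA (l.take 3) && isDoneA (l.drop 1)) := by
  conv_lhs => unfold isDoneA
  have h2 : ¬ l.length ≤ 2 := by omega
  have h3 : l.length ≠ 3 := by omega
  simp [h2, h3]

-- the two is_done implementations agree
lemma isDone_eq (l : List (Option String)) : isDoneA l = isDoneB l := by
  induction hn : l.length using Nat.strong_induction_on generalizing l with
  | _ n ih =>
    by_cases h2 : l.length ≤ 2
    · rw [isDoneA_short l h2, isDoneB_short l h2]
    · cases l with
      | nil => simp at h2
      | cons a t =>
        have ht : 2 ≤ t.length := by simp only [List.length_cons] at h2; omega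
        rw [isDoneB_cons a t ht]
        by_cases h3 : (a :: t).length = 3
        · rw [isDoneA_three _ h3]
          rw [List.take_of_length_le (by omega), isDoneB_short t (by simp at h3; omega)]
          simp
        · have h4 : 4 ≤ (a :: t).length := by omega
          rw [isDoneA_long _ h4]
          have hA3 : isDoneA ((a :: t).take 3) =
              decide (((a :: t).take 3) ≠ [some "1", some "0", some "1"]) := by
            apply isDoneA_three
            rw [List.length_take]
            simp only [List.length_cons] at h4 ⊢; omega
          have hdrop : (a :: t).drop 1 = t := rfl
          rw [hA3, hdrop,
            ih t.length (by simp only [List.length_cons] at hn; omega) t rfl]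

-- inner loop of A: returns `some i` iff some single flip succeeds
lemma innerA_eq (a_list : List String) (i : Int) (js : List Nat) :
    innerA a_list i js =
      (if js.any (fun p => isDoneA ((a_list.map some).set p none)) then some i else none) := by
  induction js with
  | nil => simp [innerA]
  | cons j rest ih =>
    simp only [innerA, List.any_cons]
    by_cases h : isDoneA ((a_list.map some).set j none) = true
    · simp [h]
    · simp [h, ih]

-- if no single flip succeeds, every iteration of A's outer loop yields none
lemma loopA_none (a_list : List String) (idx1 : List Nat)
    (h : idx1.any (fun p => isDoneA ((a_list.map some).set p none)) = false) :
    ∀ rng : List Int, loopA a_list idx1 rng = none := by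
  intro rng
  induction rng with
  | nil => rfl
  | cons i rest ih =>
    simp only [loopA, innerA_eq, h]
    exact ih

-- A's position list equals B's comprehension
lemma indexes_eq (a_list : List String) :
    indexes_of a_list "1" =
      (List.range a_list.length).filterMap
        (fun j => if a_list.getD j "" == "1" then some j else none) := by
  unfold indexes_of
  generalize List.range a_list.length = r
  induction r using List.reverseRecOn with
  | nil => rfl
  | append_singleton xs x ih =>
    rw [List.foldl_append, List.filterMap_append, ih]
    simp only [List.foldl_cons, List.foldl_nil, List.filterMap_cons, List.filterMap_nil]
    split <;> simp

-- main agreement on the not-done branch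
lemma not_done_branch (a_list : List String)
    (h : isDoneA (a_list.map some) = false) :
    loopA a_list (indexes_of a_list "1")
        (PySem.List.pyRange 1 ((indexes_of a_list "1").length : Int) 1) =
      min_switch_alt a_list := by
  have hB : isDoneB (a_list.map some) = false := by rw [← isDone_eq]; exact h
  unfold min_switch_alt
  rw [if_neg (by simp [hB])]
  rw [indexes_eq a_list]
  set ones := (List.range a_list.length).filterMap
      (fun j => if a_list.getD j "" == "1" then some j else none) with hones
  by_cases hlen : ones.length < 2
  · -- range(1, len) is empty, A's outer loop never runs
    rw [if_pos hlen, PySem.List.pyRange_one_eq_nil (by omega)]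
    rfl
  · rw [if_neg hlen]
    have hcons : PySem.List.pyRange 1 ((ones.length : Int)) 1 =
        1 :: PySem.List.pyRange 2 ((ones.length : Int)) 1 := by
      have := PySem.List.pyRange_one_cons (a := 1) (b := (ones.length : Int)) (by omega)
      simpa using this
    rw [hcons]
    by_cases hany : ones.any (fun p => isDoneB ((a_list.map some).set p none)) = true
    · have hanyA : ones.any (fun p => isDoneA ((a_list.map some).set p none)) = true := by
        simpa only [isDone_eq] using hany
      simp only [loopA, innerA_eq, hanyA, if_true, hany]
    · rw [Bool.not_eq_true] at hany
      have hanyA : ones.any (fun p => isDoneA ((a_list.map some).set p none)) = false := by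
        simpa only [isDone_eq] using hany
      simp only [loopA, innerA_eq, hanyA, hany]
      exact loopA_none a_list ones hanyA _

-- ===== VERDICT (by name: the statement is the Claim_ definition above) =====
theorem min_switch_spec : Claim_equal_min_switch := by
  intro a_list _
  unfold Spec_min_switch min_switch
  by_cases h : isDoneA (a_list.map some) = true
  · rw [if_pos h]
    unfold min_switch_alt
    rw [← isDone_eq, h]
    rfl
  · rw [Bool.not_eq_true] at h
    rw [if_neg (by simp [h])]
    exact not_done_branch a_list h
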